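-- pv_equiv track=rewrite | github.com/lilberick/Competitive-programming | online-judge-solutions/Codeforces/1566B.py | CeroCon
-- ===== SOURCE A (Python) =====
-- def CeroCon(s: str)->int:
--     n0=s.count('0')
--     consecutivo=1
--     v=[]
--     if(n0==0):consecutivo=0
--     else:
--         for i in range(len(s)):
--             if(s[i]=='0'):v.append(i)
--         if(len(s)==1):
--             if(s=="1"):consecutivo=0
--         else:
--             for i in range(1,len(v)):
--                 if((v[i]-v[i-1])>1):consecutivo=0
--     return consecutivo
-- ===== SOURCE B (Python) =====
-- def CeroCon(s: str) -> int:
--     n0 = s.count('0')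
--     if n0 == 0:
--         return 0
--     return 1 if '0' * n0 in s else 0
-- ===== Notes on version B (the rewrite author's own statement) =====
-- stated objective: idiomatic
-- what changed: Instead of collecting every zero's index into a list and scanning adjacent gaps, B builds the expected contiguous run of zeros (length = zero count) once and answers with a single substring-membership test.
import Mathlib
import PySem

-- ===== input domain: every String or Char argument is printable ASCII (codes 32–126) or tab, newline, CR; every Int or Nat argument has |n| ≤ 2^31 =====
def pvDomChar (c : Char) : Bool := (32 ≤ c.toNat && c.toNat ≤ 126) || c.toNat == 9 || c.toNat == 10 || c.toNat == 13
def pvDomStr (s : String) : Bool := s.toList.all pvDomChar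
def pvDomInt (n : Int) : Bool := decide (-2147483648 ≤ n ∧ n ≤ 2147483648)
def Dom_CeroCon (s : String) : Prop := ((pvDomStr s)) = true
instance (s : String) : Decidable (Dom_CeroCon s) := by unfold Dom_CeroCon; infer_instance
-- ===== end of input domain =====

-- B replaces A's zero-index list and adjacent-gap scan by one substring test: '0'*count in s (idiomatic; same asymptotic cost).

-- ===== PORT A =====
def CeroCon (s : String) : Int :=
  let n0 := PySem.Str.count s "0"
  let consecutivo : Int := 1
  let v : List Int := []
  if n0 = 0 then 0
  else
    let v := (PySem.List.pyRange 0 (PySem.Str.len s) 1).foldl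
      (fun v i => if PySem.Str.pyGet? s i = some '0' then v ++ [i] else v) v
    if PySem.Str.len s = 1 then
      if s = "1" then 0 else consecutivo
    else
      (PySem.List.pyRange 1 (v.length : Int) 1).foldl
        (fun c i => if 1 < PySem.List.pyGetD v i 0 - PySem.List.pyGetD v (i - 1) 0 then 0 else c)
        consecutivo

-- ===== PORT B =====
def CeroCon_alt (s : String) : Int :=
  let n0 := PySem.Str.count s "0"
  if n0 = 0 then 0
  else if PySem.Str.isIn (String.ofList (List.replicate n0 '0')) s then 1 else 0

-- ===== PRECONDITION & SPEC =====
def Spec_CeroCon (s : String) (out : Int) : Prop := out = CeroCon_alt s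
instance (s : String) (out : Int) : Decidable (Spec_CeroCon s out) := by unfold Spec_CeroCon; infer_instance

-- ===== CLAIM (what is proved, stated in full; the proofs are below) =====
def Claim_equal_CeroCon : Prop := ∀ (s : String), Dom_CeroCon s → Spec_CeroCon s (CeroCon s)

-- ===== LEMMAS AND PROOFS =====

-- s.count('0') for a one-character needle is the character count
theorem pvGo (c : Char) : ∀ (s : List Char) (fuel acc : Nat), s.length ≤ fuel →
    PySem.Chars.count.go [c] fuel s acc = acc + s.count c := by
  intro s
  induction s with
  | nil => intro fuel acc _; cases fuel <;> simp [PySem.Chars.count.go]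
  | cons x t ih =>
    intro fuel acc hf
    cases fuel with
    | zero => simp at hf
    | succ f =>
      by_cases hx : c = x
      · subst hx
        have h1 : [c].isPrefixOf (c :: t) = true := by simp [List.isPrefixOf]
        rw [PySem.Chars.count.go, List.count_cons]
        simp only [h1, if_true, List.length_cons, List.drop_succ_cons, List.length_nil, List.drop_zero]
        rw [ih f (acc + 1) (by simpa using hf)]
        simp
        omega
      · have h1 : [c].isPrefixOf (x :: t) = false := by simp [List.isPrefixOf]; exact hx
        rw [PySem.Chars.count.go, List.count_cons]
        simp only [h1, if_false, Bool.false_eq_true]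
        rw [ih f acc (by simpa using hf)]
        have : (x == c) = false := by simp [Ne.symm hx]
        simp [this]

theorem pvCountSingleton (l : List Char) (c : Char) :
    PySem.Chars.count l [c] = l.count c := by
  simp [PySem.Chars.count, pvGo c l l.length 0 le_rfl]

-- the list of indices of '0' in l, offset by k
def pvZi : List Char → Nat → List Nat
  | [], _ => []
  | x :: xs, k => if x = '0' then k :: pvZi xs (k + 1) else pvZi xs (k + 1)

theorem pvZi_append : ∀ (u w : List Char) (k : Nat),
    pvZi (u ++ w) k = pvZi u k ++ pvZi w (k + u.length) := by
  intro u
  induction u with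
  | nil => simp [pvZi]
  | cons x t ih =>
    intro w k
    simp only [List.cons_append, pvZi, ih]
    split <;> simp <;> ring_nf

theorem pvZi_of_no_zero (u : List Char) (k : Nat) (h : '0' ∉ u) : pvZi u k = [] := by
  induction u generalizing k with
  | nil => rfl
  | cons x t ih =>
    simp only [List.mem_cons, not_or] at h
    simp [pvZi, Ne.symm h.1, ih (k + 1) h.2]

theorem pvZi_replicate : ∀ (n k : Nat), pvZi (List.replicate n '0') k = List.range' k n := by
  intro n
  induction n with
  | zero => intro k; rfl
  | succ m ih => intro k; simp [List.replicate_succ, pvZi, ih, List.range'_succ]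

theorem pvZi_length (l : List Char) : ∀ k, (pvZi l k).length = l.count '0' := by
  induction l with
  | nil => simp [pvZi]
  | cons x t ih =>
    intro k
    by_cases hx : x = '0' <;> simp [pvZi, hx, ih]

theorem pvZi_sound (l : List Char) : ∀ (k i : Nat), i ∈ pvZi l k →
    ∃ j, ∃ h : j < l.length, i = k + j ∧ l[j] = '0' := by
  induction l with
  | nil => simp [pvZi]
  | cons x t ih =>
    intro k i hi
    by_cases hx : x = '0' <;> simp only [pvZi, hx, if_true, if_false, List.mem_cons] at hi
    · rcases hi with rfl | hi
      · exact ⟨0, by simp, by simp [hx]⟩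
      · obtain ⟨j, hj, hij, hl⟩ := ih (k + 1) i hi
        exact ⟨j + 1, by simpa using hj, by omega, by simpa using hl⟩
    · obtain ⟨j, hj, hij, hl⟩ := ih (k + 1) i hi
      exact ⟨j + 1, by simpa using hj, by omega, by simpa using hl⟩

theorem pvZi_lb (l : List Char) : ∀ (k i : Nat), i ∈ pvZi l k → k ≤ i := by
  intro k i hi
  obtain ⟨j, _, hij, _⟩ := pvZi_sound l k i hi
  omega

theorem pvZi_pairwise (l : List Char) : ∀ k, (pvZi l k).Pairwise (· < ·) := by
  induction l with
  | nil => intro k; simp [pvZi]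
  | cons x t ih =>
    intro k
    by_cases hx : x = '0' <;> simp only [pvZi, hx, if_true, if_false]
    · exact List.Pairwise.cons (fun i hi => lt_of_lt_of_le (Nat.lt_succ_self k) (pvZi_lb t (k+1) i hi)) (ih (k+1))
    · exact ih (k + 1)

-- the index-collecting loop of A computes pvZi
theorem pvV (l : List Char) : ∀ acc : List Int,
    (PySem.List.pyRange 0 (l.length : Int) 1).foldl
      (fun v i => if PySem.List.pyGet? l i = some '0' then v ++ [i] else v) acc
    = acc ++ (pvZi l 0).map (fun n : Nat => (n : Int)) := by
  induction l using List.reverseRecOn with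
  | nil => intro acc; simp [pvZi]
  | append_singleton u x ih =>
    intro acc
    have hlen : ((u ++ [x]).length : Int) = (u.length : Int) + 1 := by simp
    rw [hlen, PySem.List.pyRange_one_succ_right (by positivity), List.foldl_append]
    have hcongr : (PySem.List.pyRange 0 (u.length : Int) 1).foldl
        (fun v i => if PySem.List.pyGet? (u ++ [x]) i = some '0' then v ++ [i] else v) acc
        = (PySem.List.pyRange 0 (u.length : Int) 1).foldl
        (fun v i => if PySem.List.pyGet? u i = some '0' then v ++ [i] else v) acc := by
      apply PySem.List.foldl_congr_mem
      intro a i hi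
      rw [PySem.List.mem_pyRange_one] at hi
      have h0 : i = ((i.toNat : Nat) : Int) := by omega
      have hlt : i.toNat < u.length := by omega
      rw [h0, PySem.List.pyGet?_natCast, PySem.List.pyGet?_natCast,
        List.getElem?_append_left hlt]
    rw [hcongr, ih]
    have hx : PySem.List.pyGet? (u ++ [x]) ((u.length : Nat) : Int) = some x := by
      rw [PySem.List.pyGet?_natCast]
      simp
    have hz : pvZi (u ++ [x]) 0 = pvZi u 0 ++ pvZi [x] u.length := by
      simpa using pvZi_append u [x] 0
    by_cases hx0 : x = '0'
    · subst hx0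
      simp [hz, pvZi]
    · simp [hx0, hz, pvZi]

-- A's "set the flag to 0" loop
theorem pvFlag (P : Int → Prop) [DecidablePred P] :
    ∀ (L : List Int) (a : Int),
    L.foldl (fun acc i => if P i then 0 else acc) a
    = if L.any (fun i => decide (P i)) then 0 else a := by
  intro L
  induction L with
  | nil => intro a; simp
  | cons x t ih =>
    intro a
    by_cases hx : P x
    · simp [hx, ih 0]
    · simp [hx, ih a]

-- a list whose adjacent elements step by one is a range'
theorem pvEqRange' : ∀ z : List Nat,
    (∀ t (h : t + 1 < z.length), z[t + 1] = z[t] + 1) →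
    z = List.range' (z.headD 0) z.length := by
  intro z
  induction z with
  | nil => intro _; rfl
  | cons a t ih =>
    intro h
    have ht : t = List.range' (t.headD 0) t.length := by
      apply ih
      intro u hu
      have := h (u + 1) (by simpa using Nat.succ_lt_succ hu)
      simpa using this
    cases t with
    | nil => simp [List.range'_succ]
    | cons b t' =>
      have hb : b = a + 1 := by simpa using h 0 (by simp)
      simp only [List.headD_cons] at ht ⊢
      rw [List.length_cons, List.range'_succ, ← hb, ← ht]

-- consecutiveness of the zero indices ↔ the block '0'*count occurs in l
theorem pvSuccIffInfix (l : List Char) (hc : 0 < l.count '0') :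
    (∀ t (h : t + 1 < (pvZi l 0).length), (pvZi l 0)[t + 1] = (pvZi l 0)[t] + 1)
    ↔ List.replicate (l.count '0') '0' <:+: l := by
  have hlen : (pvZi l 0).length = l.count '0' := pvZi_length l 0
  constructor
  · intro h
    set z := pvZi l 0 with hzdef
    set a := z.headD 0 with hadef
    have hz : z = List.range' a z.length := pvEqRange' z h
    have hmem : ∀ j, j < z.length → ∃ hj : a + j < l.length, l[a + j] = '0' := by
      intro j hj
      have : a + j ∈ z := by
        rw [hz]; exact List.mem_range'_1.mpr ⟨Nat.le_add_right a j, by omega⟩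
      obtain ⟨j', hj', hij, hl⟩ := pvZi_sound l 0 (a + j) this
      exact ⟨by omega, by convert hl using 2; omega⟩
    have hle : a + z.length ≤ l.length := by
      obtain ⟨hj, _⟩ := hmem (z.length - 1) (by omega)
      omega
    have hseg : (l.drop a).take z.length = List.replicate (l.count '0') '0' := by
      rw [List.eq_replicate_iff]
      constructor
      · simp; omega
      · intro b hb
        rw [List.mem_iff_getElem] at hb
        obtain ⟨t, hts, hbt⟩ := hb
        have htz : t < z.length := by simpa using lt_of_lt_of_le hts (by simp)
        obtain ⟨hj, hl0⟩ := hmem t htz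
        rw [← hbt, List.getElem_take, List.getElem_drop]
        exact hl0
    rw [← hseg]
    exact (List.take_prefix _ _).isInfix.trans (List.drop_suffix a l).isInfix
  · intro h
    obtain ⟨u, w, hw⟩ := h
    have hl : l = u ++ (List.replicate (l.count '0') '0' ++ w) := by
      rw [← List.append_assoc]; exact hw.symm
    have hcnt : u.count '0' + (l.count '0' + w.count '0') = l.count '0' := by
      conv_rhs => rw [hl]
      simp [List.count_append]
    have hu : '0' ∉ u := List.count_eq_zero.mp (by omega)
    have hwz : '0' ∉ w := List.count_eq_zero.mp (by omega)
    have hz : pvZi l 0 = List.range' u.length (l.count '0') := by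
      conv_lhs => rw [hl]
      rw [pvZi_append, pvZi_of_no_zero u 0 hu, pvZi_append, pvZi_replicate,
        pvZi_of_no_zero w _ hwz]
      simp
    intro t ht
    simp only [hz, List.length_range'] at ht
    simp only [hz]
    rw [List.getElem_range'_1, List.getElem_range'_1]
    omega

-- the gap-scan's flag condition ↔ the block occurs
theorem pvGapAux (z : List Nat) (hp : z.Pairwise (· < ·)) :
    (((PySem.List.pyRange 1 ((z.map (fun n : Nat => (n : Int))).length : Int) 1).any
      (fun i => decide (1 < PySem.List.pyGetD (z.map (fun n : Nat => (n : Int))) i 0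
        - PySem.List.pyGetD (z.map (fun n : Nat => (n : Int))) (i - 1) 0))) = false)
    ↔ (∀ t (h : t + 1 < z.length), z[t + 1] = z[t] + 1) := by
  have hget : ∀ t (h : t < z.length),
      PySem.List.pyGetD (z.map (fun n : Nat => (n : Int))) ((t : Nat) : Int) 0 = (z[t] : Int) := by
    intro t h
    rw [PySem.List.pyGetD_natCast]
    rw [List.getD_eq_getElem _ _ (by simpa using h), List.getElem_map]
  have hpair : ∀ t (h : t + 1 < z.length), z[t] < z[t + 1] := by
    intro t h
    exact List.pairwise_iff_getElem.mp hp t (t + 1) (by omega) h (by omega)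
  rw [List.any_eq_false]
  constructor
  · intro h t ht
    have hmem : ((t : Int) + 1) ∈ PySem.List.pyRange 1 ((z.map (fun n : Nat => (n : Int))).length : Int) 1 := by
      rw [PySem.List.mem_pyRange_one]
      refine ⟨by omega, ?_⟩
      simp only [List.length_map]
      omega
    have h2 := h _ hmem
    simp only [decide_eq_true_eq, not_lt] at h2
    rw [show ((t : Int) + 1) = (((t + 1 : Nat) : Nat) : Int) by push_cast; ring] at h2
    rw [show (((t + 1 : Nat) : Int)) - 1 = ((t : Nat) : Int) by push_cast; ring] at h2
    rw [hget (t + 1) ht, hget t (by omega)] at h2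
    have h3 := hpair t ht
    omega
  · intro h i hi
    rw [PySem.List.mem_pyRange_one] at hi
    simp only [List.length_map] at hi
    have ht : (i.toNat - 1) + 1 < z.length := by omega
    rw [show i = ((((i.toNat - 1) + 1 : Nat) : Nat) : Int) by omega]
    simp only [decide_eq_true_eq, not_lt]
    rw [show ((((i.toNat - 1) + 1 : Nat) : Int)) - 1 = ((i.toNat - 1 : Nat) : Int) by push_cast; ring]
    rw [hget _ ht, hget (i.toNat - 1) (by omega)]
    have h2 := h (i.toNat - 1) ht
    omega

-- the gap-scan's flag condition ↔ the block occurs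
theorem pvGap (l : List Char) (hc : 0 < l.count '0') :
    (((PySem.List.pyRange 1 (((pvZi l 0).map (fun n : Nat => (n : Int))).length : Int) 1).any
      (fun i => decide (1 < PySem.List.pyGetD ((pvZi l 0).map (fun n : Nat => (n : Int))) i 0
        - PySem.List.pyGetD ((pvZi l 0).map (fun n : Nat => (n : Int))) (i - 1) 0))) = false)
    ↔ List.replicate (l.count '0') '0' <:+: l := by
  rw [pvGapAux (pvZi l 0) (pvZi_pairwise l 0)]
  exact pvSuccIffInfix l hc

-- ===== VERDICT (by name: the statement is the Claim_ definition above) =====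
theorem CeroCon_spec : Claim_equal_CeroCon := by
  intro s _
  unfold Spec_CeroCon CeroCon CeroCon_alt
  obtain ⟨l, hl⟩ : ∃ l, s.toList = l := ⟨_, rfl⟩
  have hcnt : PySem.Str.count s "0" = l.count '0' := by
    rw [PySem.Str.count_eq, show ("0" : String).toList = ['0'] from rfl, hl]
    exact pvCountSingleton l '0'
  have hlen : PySem.Str.len s = (l.length : Int) := by rw [PySem.Str.len_eq, hl]
  have hB : ∀ n, (PySem.Str.isIn (String.ofList (List.replicate n '0')) s = true
      ↔ List.replicate n '0' <:+: l) := by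
    intro n
    rw [PySem.Str.isIn_iff_infix, hl]
    simp
  simp only [hcnt]
  by_cases hc : l.count '0' = 0
  · simp [hc]
  · have hc' : 0 < l.count '0' := Nat.pos_of_ne_zero hc
    simp only [if_neg hc]
    have hv : (PySem.List.pyRange 0 (PySem.Str.len s) 1).foldl
        (fun v i => if PySem.Str.pyGet? s i = some '0' then v ++ [i] else v) ([] : List Int)
        = (pvZi l 0).map (fun n : Nat => (n : Int)) := by
      rw [hlen]
      have hcg : (PySem.List.pyRange 0 ((l.length : Nat) : Int) 1).foldl
          (fun v i => if PySem.Str.pyGet? s i = some '0' then v ++ [i] else v) ([] : List Int)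
          = (PySem.List.pyRange 0 ((l.length : Nat) : Int) 1).foldl
          (fun v i => if PySem.List.pyGet? l i = some '0' then v ++ [i] else v) ([] : List Int) := by
        apply PySem.List.foldl_congr_mem
        intro a i _
        rw [PySem.Str.pyGet?_eq]
        rw [show PySem.Chars.pyGet? s.toList i = PySem.List.pyGet? s.toList i from
          PySem.Chars.pyGet?_eq_listPyGet? s.toList i, hl]
      rw [hcg, pvV l]
      simp
    rw [hv]
    by_cases h1 : PySem.Str.len s = 1
    · -- one-character string containing a '0': it is "0", both sides give 1
      have hlen1 : l.length = 1 := by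
        rw [hlen] at h1
        omega
      have hs1 : ¬ (s = "1") := by
        intro hs
        rw [hs, show ("1" : String).toList = ['1'] from rfl] at hl
        rw [← hl] at hc
        exact hc rfl
      have hrep : List.replicate (l.count '0') '0' <:+: l := by
        have hcle : l.count '0' ≤ 1 := hlen1 ▸ List.count_le_length
        have hc1 : l.count '0' = 1 := by omega
        rw [hc1]
        cases l with
        | nil => simp at hlen1
        | cons x t =>
          cases t with
          | nil =>
            have hx0 : x = '0' := by
              by_contra hx
              simp [hx] at hc1
            simp [hx0]
          | cons y t' => simp at hlen1
      rw [if_pos h1, if_neg hs1, if_pos ((hB _).mpr hrep)]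
    · rw [if_neg h1, pvFlag]
      have hiff := pvGap l hc'
      rcases em (List.replicate (l.count '0') '0' <:+: l) with hin | hin
      · have hfalse := hiff.mpr hin
        rw [if_neg (by rw [hfalse]; decide), if_pos ((hB _).mpr hin)]
      · rcases Bool.eq_false_or_eq_true ((PySem.List.pyRange 1
            ((((pvZi l 0).map (fun n : Nat => (n : Int))).length : Nat) : Int) 1).any
            (fun i => decide (1 < PySem.List.pyGetD ((pvZi l 0).map (fun n : Nat => (n : Int))) i 0
              - PySem.List.pyGetD ((pvZi l 0).map (fun n : Nat => (n : Int))) (i - 1) 0))) with hb | hb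
        · rw [if_pos hb, if_neg (by rw [hB]; exact hin)]
        · exact absurd (hiff.mp hb) hin
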